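-- pv_equiv track=rewrite | github.com/jcolinpatrick/kryptos | scripts/_uncategorized/e_s_berlin_extend.py | check_periods
-- ===== SOURCE A (Python) =====
-- def check_periods(ks_dict):
--     """Return list of periods 1-26 that are consistent with the sparse keystream."""
--     consistent = []
--     for period in range(1, 27):
--         residue = {}
--         ok = True
--         for pos, kv in ks_dict.items():
--             r = pos % period
--             if r in residue:
--                 if residue[r] != kv:
--                     ok = False
--                     break
--             else:
--                 residue[r] = kv
--         if ok:
--             consistent.append(period)
--     return consistent
-- ===== SOURCE B (Python) =====
-- def _pairs(items):
--     """Yield all (earlier, later) entry pairs."""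
--     while items:
--         head, items = items[0], items[1:]
--         for x in items:
--             yield head, x
--
--
-- def check_periods(ks_dict):
--     """Return list of periods 1-26 that are consistent with the sparse keystream."""
--     alive = list(range(1, 27))
--     for (p1, v1), (p2, v2) in _pairs(list(ks_dict.items())):
--         if v1 != v2:
--             alive = [p for p in alive if (p1 - p2) % p != 0]
--             if not alive:
--                 break
--     return alive
-- ===== Notes on version B (the rewrite author's own statement) =====
-- stated objective: alternative
-- what changed: A tests each period 1-26 separately by streaming entries into a residue->value dict with an early break on conflict; B never forms residue classes: it streams all entry pairs once through a sieve that, on each pair with differing values, drops the surviving periods dividing the pair's position distance (stopping when none survive).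
import Mathlib
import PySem

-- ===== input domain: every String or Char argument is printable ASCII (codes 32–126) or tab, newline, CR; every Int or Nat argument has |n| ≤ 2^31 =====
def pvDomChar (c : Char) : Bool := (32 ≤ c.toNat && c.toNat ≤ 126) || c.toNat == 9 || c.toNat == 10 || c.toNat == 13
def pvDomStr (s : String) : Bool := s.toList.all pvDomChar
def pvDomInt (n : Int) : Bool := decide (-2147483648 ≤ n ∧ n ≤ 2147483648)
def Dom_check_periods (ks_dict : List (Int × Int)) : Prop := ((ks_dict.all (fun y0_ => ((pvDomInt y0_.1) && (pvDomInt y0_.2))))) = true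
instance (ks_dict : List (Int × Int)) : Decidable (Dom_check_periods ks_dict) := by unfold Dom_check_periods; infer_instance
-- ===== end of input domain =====

-- B replaces A's per-period residue-dict scan by a pairwise-distance sieve: it streams all
-- entry pairs once, and on each conflicting pair drops the periods dividing the position
-- distance, stopping when none survive (alternative decomposition, not claimed faster).

-- ===== PORT A =====
-- inner 'for pos, kv in ks_dict.items()' loop with early break: residue dict holds first value per residue class
def checkA_loop (period : Int) : List (Int × Int) → PySem.Dict Int Int → Bool
  | [], _ => true
  | (pos, kv) :: rest, residue =>
      let r := PySem.Int.mod pos period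
      match residue.get? r with
      | some v => if v ≠ kv then false else checkA_loop period rest residue
      | none => checkA_loop period rest (residue.insert r kv)

def check_periods (ks_dict : List (Int × Int)) : List Int :=
  (PySem.List.pyRange 1 27 1).foldl
    (fun consistent period =>
      if checkA_loop period ks_dict PySem.Dict.empty then consistent ++ [period] else consistent)
    []

-- ===== PORT B =====
-- _pairs generator: all (earlier, later) entry pairs, in yield order
def pairsB : List (Int × Int) → List ((Int × Int) × (Int × Int))
  | [] => []
  | head :: rest => rest.map (fun x => (head, x)) ++ pairsB rest

-- 'for (p1,v1),(p2,v2) in _pairs(...)' loop filtering alive, with break when alive is empty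
def sieveB : List ((Int × Int) × (Int × Int)) → List Int → List Int
  | [], alive => alive
  | q :: rest, alive =>
      if q.1.2 != q.2.2 then
        let alive' := alive.filter (fun p => PySem.Int.mod (q.1.1 - q.2.1) p != 0)
        if alive' = [] then [] else sieveB rest alive'
      else sieveB rest alive

def check_periods_alt (ks_dict : List (Int × Int)) : List Int :=
  sieveB (pairsB ks_dict) (PySem.List.pyRange 1 27 1)

-- ===== PRECONDITION & SPEC =====
def Spec_check_periods (ks_dict : List (Int × Int)) (out : List Int) : Prop := out = check_periods_alt ks_dict
instance (ks_dict : List (Int × Int)) (out : List Int) : Decidable (Spec_check_periods ks_dict out) := by unfold Spec_check_periods; infer_instance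

-- ===== CLAIM (what is proved, stated in full; the proofs are below) =====
def Claim_equal_check_periods : Prop := ∀ (ks_dict : List (Int × Int)), Dom_check_periods ks_dict → Spec_check_periods ks_dict (check_periods ks_dict)

-- ===== LEMMAS AND PROOFS =====

-- the keystream values seen at residue class r, in encounter order
def grp (period : Int) (ks : List (Int × Int)) (r : Int) : List Int :=
  (ks.filter (fun p => PySem.Int.mod p.1 period == r)).map (·.2)

theorem grp_append (period : Int) (ks ks' : List (Int × Int)) (r : Int) :
    grp period (ks ++ ks') r = grp period ks r ++ grp period ks' r := by
  simp [grp, List.filter_append]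

theorem grp_singleton_self (period : Int) (p : Int × Int) :
    grp period [p] (PySem.Int.mod p.1 period) = [p.2] := by
  simp [grp]

theorem grp_singleton_ne (period : Int) (p : Int × Int) (r : Int)
    (h : PySem.Int.mod p.1 period ≠ r) : grp period [p] r = [] := by
  simp [grp, h]

theorem mem_grp_iff (period : Int) (ks : List (Int × Int)) (r y : Int) :
    y ∈ grp period ks r ↔ ∃ z ∈ ks, PySem.Int.mod z.1 period = r ∧ z.2 = y := by
  simp only [grp, List.mem_map, List.mem_filter, beq_iff_eq]
  constructor
  · rintro ⟨z, ⟨hm, hr⟩, hy⟩; exact ⟨z, hm, hr, hy⟩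
  · rintro ⟨z, hm, hr, hy⟩; exact ⟨z, ⟨hm, hr⟩, hy⟩

theorem checkA_loop_char (period : Int) :
    ∀ (rest seen : List (Int × Int)) (residue : PySem.Dict Int Int),
      (∀ r, residue.get? r = (grp period seen r).head?) →
      checkA_loop period rest residue
        = rest.all (fun p => (grp period (seen ++ rest) (PySem.Int.mod p.1 period)).head? == some p.2) := by
  intro rest
  induction rest with
  | nil => intro seen residue h; simp [checkA_loop]
  | cons p rest ih =>
    intro seen residue h
    obtain ⟨pos, kv⟩ := p
    have hkey : PySem.Int.mod (pos, kv).1 period = PySem.Int.mod pos period := rfl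
    have hseen : ∀ r, grp period (seen ++ (pos, kv) :: rest) r
        = grp period seen r ++ grp period [(pos, kv)] r ++ grp period rest r := by
      intro r
      rw [show seen ++ (pos, kv) :: rest = (seen ++ [(pos, kv)]) ++ rest from by simp,
          grp_append, grp_append]
    rw [checkA_loop]
    simp only [List.all_cons]
    rcases hg : grp period seen (PySem.Int.mod pos period) with _ | ⟨g0, gs⟩
    · -- residue class unseen
      have hr : residue.get? (PySem.Int.mod pos period) = none := by rw [h, hg]; rfl
      rw [hr]
      have hinv : ∀ r, (residue.insert (PySem.Int.mod pos period) kv).get? r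
          = (grp period (seen ++ [(pos, kv)]) r).head? := by
        intro r
        rw [PySem.Dict.get?_insert, grp_append]
        split_ifs with hrr
        · subst hrr; rw [hg, grp_singleton_self period (pos, kv)]; rfl
        · rw [h, grp_singleton_ne period (pos, kv) r (fun e => hrr e.symm)]; simp
      rw [ih (seen ++ [(pos, kv)]) (residue.insert (PySem.Int.mod pos period) kv) hinv]
      have hhd : (grp period (seen ++ (pos, kv) :: rest) (PySem.Int.mod pos period)).head? = some kv := by
        rw [hseen, hg, hkey, grp_singleton_self period (pos, kv)]; simp
      rw [hkey, hhd]
      simp [show seen ++ [(pos, kv)] ++ rest = seen ++ (pos, kv) :: rest from by simp]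
    · -- residue class already seen, first value g0
      have hr : residue.get? (PySem.Int.mod pos period) = some g0 := by rw [h, hg]; rfl
      rw [hr]
      have hhead : (grp period (seen ++ (pos, kv) :: rest) (PySem.Int.mod pos period)).head? = some g0 := by
        rw [hseen, hg]; simp
      change (if g0 ≠ kv then false else checkA_loop period rest residue) = _
      by_cases hne : g0 ≠ kv
      · rw [if_pos hne, hkey, hhead]
        have : (some g0 == some kv) = false := by simp [hne]
        simp [this]
      · simp only [not_not] at hne
        subst hne
        rw [if_neg (fun hc => hc rfl)]
        have hinv : ∀ r, residue.get? r = (grp period (seen ++ [(pos, g0)]) r).head? := by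
          intro r
          rw [grp_append]
          by_cases hrr : PySem.Int.mod pos period = r
          · subst hrr; rw [h, hg, grp_singleton_self period (pos, g0)]; simp
          · rw [h, grp_singleton_ne period (pos, g0) r hrr]; simp
        rw [ih (seen ++ [(pos, g0)]) residue hinv, hkey, hhead]
        simp [show seen ++ [(pos, g0)] ++ rest = seen ++ (pos, g0) :: rest from by simp]

theorem grp_cons (period : Int) (h : Int × Int) (t : List (Int × Int)) (r : Int) :
    grp period (h :: t) r
      = (if PySem.Int.mod h.1 period = r then [h.2] else []) ++ grp period t r := by
  simp [grp, List.filter_cons]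
  split_ifs with hr
  · simp
  · simp

-- head condition per element ↔ pairwise agreement on equal residues
theorem head_iff_pairs (p : Int) :
    ∀ ks : List (Int × Int),
      (∀ x ∈ ks, (grp p ks (PySem.Int.mod x.1 p)).head? = some x.2)
      ↔ (∀ q ∈ pairsB ks, PySem.Int.mod q.1.1 p = PySem.Int.mod q.2.1 p → q.1.2 = q.2.2) := by
  intro ks
  induction ks with
  | nil => simp [pairsB]
  | cons h t ih =>
    have fhead : (grp p (h :: t) (PySem.Int.mod h.1 p)).head? = some h.2 := by
      rw [grp_cons]; simp
    have fne : ∀ r, PySem.Int.mod h.1 p ≠ r → grp p (h :: t) r = grp p t r := by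
      intro r hr; rw [grp_cons]; simp [hr]
    constructor
    · intro hP
      have hpair : ∀ x ∈ t, PySem.Int.mod h.1 p = PySem.Int.mod x.1 p → h.2 = x.2 := by
        intro x hx hr
        have := hP x (List.mem_cons_of_mem _ hx)
        rw [← hr, fhead] at this
        exact (Option.some.inj this)
      have hPt : ∀ x ∈ t, (grp p t (PySem.Int.mod x.1 p)).head? = some x.2 := by
        intro x hx
        by_cases hr : PySem.Int.mod h.1 p = PySem.Int.mod x.1 p
        · -- x's class is h's class: every value in it (within t) equals h.2 = x.2
          have hx2 : x.2 = h.2 := (hpair x hx hr).symm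
          have hxin : x.2 ∈ grp p t (PySem.Int.mod x.1 p) := by
            rw [mem_grp_iff]; exact ⟨x, hx, rfl, rfl⟩
          rcases hg : grp p t (PySem.Int.mod x.1 p) with _ | ⟨y, ys⟩
          · rw [hg] at hxin; simp at hxin
          · have hy : y ∈ grp p t (PySem.Int.mod x.1 p) := by rw [hg]; exact List.mem_cons_self
            rw [mem_grp_iff] at hy
            obtain ⟨z, hz, hzr, hzy⟩ := hy
            have : h.2 = z.2 := hpair z hz (by rw [hzr, hr])
            simp [hzy ▸ this ▸ hx2]
        · have := hP x (List.mem_cons_of_mem _ hx)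
          rwa [fne _ hr] at this
      intro q hq
      rw [pairsB, List.mem_append] at hq
      rcases hq with hq | hq
      · obtain ⟨x, hx, rfl⟩ := List.mem_map.mp hq
        exact hpair x hx
      · exact (ih.mp hPt) q hq
    · intro hQ
      have hpair : ∀ x ∈ t, PySem.Int.mod h.1 p = PySem.Int.mod x.1 p → h.2 = x.2 := by
        intro x hx hr
        exact hQ (h, x) (by rw [pairsB, List.mem_append]; exact Or.inl (List.mem_map.mpr ⟨x, hx, rfl⟩)) hr
      have hPt := ih.mpr (fun q hq => hQ q (by rw [pairsB, List.mem_append]; exact Or.inr hq))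
      intro x hx
      rcases List.mem_cons.mp hx with rfl | hx
      · exact fhead
      · by_cases hr : PySem.Int.mod h.1 p = PySem.Int.mod x.1 p
        · rw [← hr, fhead]
          exact congrArg some (hpair x hx hr)
        · rw [fne _ hr]
          exact hPt x hx

-- equal residues ↔ the period divides the position difference (for positive period)
theorem mod_eq_iff_mod_sub (p a b : Int) (hp : 0 < p) :
    PySem.Int.mod a p = PySem.Int.mod b p ↔ PySem.Int.mod (a - b) p = 0 := by
  rw [PySem.Int.mod_eq_emod_of_pos hp, PySem.Int.mod_eq_emod_of_pos hp,
      PySem.Int.mod_eq_zero_iff_dvd,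
      Int.emod_eq_emod_iff_emod_sub_eq_zero]
  exact ⟨fun h => Int.dvd_of_emod_eq_zero h, fun h => Int.emod_eq_zero_of_dvd h⟩

-- B's sieve = filter by 'no conflicting pair whose distance this period divides'
def survives (pairs : List ((Int × Int) × (Int × Int))) (p : Int) : Bool :=
  pairs.all (fun q => !((q.1.2 != q.2.2) && (PySem.Int.mod (q.1.1 - q.2.1) p == 0)))

theorem sieveB_eq_filter :
    ∀ (pairs : List ((Int × Int) × (Int × Int))) (alive : List Int),
      sieveB pairs alive = alive.filter (survives pairs) := by
  intro pairs
  induction pairs with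
  | nil =>
    intro alive
    rw [sieveB]
    symm
    rw [List.filter_eq_self]
    intro a _
    simp [survives]
  | cons q rest ih =>
    intro alive
    rw [sieveB]
    have hsv : ∀ p : Int, survives (q :: rest) p
        = (!((q.1.2 != q.2.2) && (PySem.Int.mod (q.1.1 - q.2.1) p == 0)) && survives rest p) := by
      intro p; simp [survives]
    by_cases hc : (q.1.2 != q.2.2) = true
    · rw [if_pos hc]
      simp only []
      by_cases hnil : alive.filter (fun p => PySem.Int.mod (q.1.1 - q.2.1) p != 0) = []
      · rw [if_pos hnil]
        symm
        rw [List.filter_eq_nil_iff]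
        intro p hp hs
        rw [hsv] at hs
        have h1 : (PySem.Int.mod (q.1.1 - q.2.1) p == 0) = false := by
          rcases Bool.eq_false_or_eq_true (PySem.Int.mod (q.1.1 - q.2.1) p == 0) with h | h
          · rw [hc, h] at hs; simp at hs
          · exact h
        have hmem : p ∈ alive.filter (fun p => PySem.Int.mod (q.1.1 - q.2.1) p != 0) :=
          List.mem_filter.mpr ⟨hp, by simp [bne, h1]⟩
        rw [hnil] at hmem
        simp at hmem
      · rw [if_neg hnil, ih, List.filter_filter]
        apply List.filter_congr
        intro p _
        rw [hsv, hc]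
        cases h : (PySem.Int.mod (q.1.1 - q.2.1) p == 0) <;>
          cases hs : survives rest p <;> simp [h, bne]
    · rw [if_neg hc, ih]
      apply List.filter_congr
      intro p _
      have hcf : (q.1.2 != q.2.2) = false := by
        cases hb : (q.1.2 != q.2.2)
        · rfl
        · exact absurd hb hc
      rw [hsv, hcf]
      simp

-- for positive p, surviving B's sieve ↔ pairwise agreement on equal residues
theorem survives_iff (p : Int) (hp : 0 < p) (pairs : List ((Int × Int) × (Int × Int))) :
    survives pairs p = true
      ↔ ∀ q ∈ pairs, PySem.Int.mod q.1.1 p = PySem.Int.mod q.2.1 p → q.1.2 = q.2.2 := by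
  unfold survives
  rw [List.all_eq_true]
  refine forall_congr' (fun q => forall_congr' (fun hq => ?_))
  rw [mod_eq_iff_mod_sub p q.1.1 q.2.1 hp]
  cases h : (PySem.Int.mod (q.1.1 - q.2.1) p == 0) <;>
    cases h2 : (q.1.2 != q.2.2) <;>
      simp_all [bne_iff_ne]

-- the per-period checks agree for every positive period
theorem period_check_eq (p : Int) (hp : 0 < p) (ks : List (Int × Int)) :
    checkA_loop p ks PySem.Dict.empty = survives (pairsB ks) p := by
  rw [checkA_loop_char p ks [] PySem.Dict.empty (by intro r; simp [grp, PySem.Dict.get?_empty])]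
  simp only [List.nil_append]
  rw [Bool.eq_iff_iff, List.all_eq_true, survives_iff p hp]
  constructor
  · intro hA
    exact (head_iff_pairs p ks).mp (by intro x hx; simpa using hA x hx)
  · intro hQ x hx
    simpa using ((head_iff_pairs p ks).mpr hQ) x hx

-- ===== VERDICT (by name: the statement is the Claim_ definition above) =====
theorem check_periods_spec : Claim_equal_check_periods := by
  intro ks _
  unfold Spec_check_periods check_periods check_periods_alt
  rw [PySem.List.foldl_append_if_eq_filter, List.nil_append, sieveB_eq_filter]
  apply List.filter_congr
  intro p hp
  have h1 : 0 < p := by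
    have := (PySem.List.mem_pyRange_one.mp hp).1
    omega
  exact period_check_eq p h1 ks
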